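-- pv_equiv track=rewrite | github.com/fab128k/cline-ocr-chess-app | chess_notation_parser.py | identify_notation_system
-- ===== SOURCE A (Python) =====
-- def identify_notation_system(text):
--     """Try to identify whether the text uses English or Italian notation."""
--     # Count frequency of piece characters in both systems
--     english_pieces = ['K', 'Q', 'R', 'B', 'N']
--     italian_pieces = ['R', 'D', 'T', 'A', 'C']
--
--     # Initialize counters
--     english_count = 0
--     italian_count = 0
--
--     # Count occurrences of piece symbols
--     for piece in english_pieces:
--         if piece in text:
--             english_count += text.count(piece)
--
--     # Check for Italian pieces, excluding those that overlap with English
--     if 'D' in text:  # D for Donna (Queen) is uniquely Italian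
--         italian_count += text.count('D')
--     if 'T' in text:  # T for Torre (Rook) is uniquely Italian
--         italian_count += text.count('T')
--     if 'A' in text:  # A for Alfiere (Bishop) is uniquely Italian
--         italian_count += text.count('A')
--     if 'C' in text:  # C for Cavallo (Knight) is uniquely Italian
--         italian_count += text.count('C')
--
--     # Determine the likely notation system
--     if italian_count > english_count:
--         return 'italian'
--     else:
--         return 'english'
-- ===== SOURCE B (Python) =====
-- def identify_notation_system(text):
--     """Try to identify whether the text uses English or Italian notation."""
--     english_count = 0
--     italian_count = 0
--     for ch in text:
--         if ch in 'KQRBN':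
--             english_count += 1
--         elif ch in 'DTAC':
--             italian_count += 1
--     return 'italian' if italian_count > english_count else 'english'
-- ===== Notes on version B (the rewrite author's own statement) =====
-- stated objective: simpler
-- what changed: Replaced the nine separate membership-test-plus-count scans over the text with one single pass that classifies each character into the English or Italian tally as it goes.
import Mathlib
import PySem

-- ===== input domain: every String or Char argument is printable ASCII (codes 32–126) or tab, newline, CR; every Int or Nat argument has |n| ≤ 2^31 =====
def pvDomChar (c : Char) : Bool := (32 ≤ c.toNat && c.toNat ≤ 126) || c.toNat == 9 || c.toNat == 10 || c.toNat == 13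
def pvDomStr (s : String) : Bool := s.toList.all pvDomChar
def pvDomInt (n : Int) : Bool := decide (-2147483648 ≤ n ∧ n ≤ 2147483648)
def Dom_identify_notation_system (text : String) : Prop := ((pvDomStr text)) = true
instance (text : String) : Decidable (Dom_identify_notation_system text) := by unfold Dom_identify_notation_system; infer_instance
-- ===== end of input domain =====

-- B replaces A's nine separate membership-test-and-count scans of the text with a single
-- pass that classifies each character into one of the two tallies (objective: simpler).

-- ===== PORT A =====
def identify_notation_system (text : String) : String :=
  let english_pieces : List String := ["K", "Q", "R", "B", "N"]
  let _italian_pieces : List String := ["R", "D", "T", "A", "C"]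
  let english_count : Int := 0
  let italian_count : Int := 0
  let english_count : Int := english_pieces.foldl
    (fun acc piece =>
      if PySem.Str.isIn piece text then acc + (PySem.Str.count text piece : Int) else acc)
    english_count
  let italian_count : Int :=
    if PySem.Str.isIn "D" text then italian_count + (PySem.Str.count text "D" : Int) else italian_count
  let italian_count : Int :=
    if PySem.Str.isIn "T" text then italian_count + (PySem.Str.count text "T" : Int) else italian_count
  let italian_count : Int :=
    if PySem.Str.isIn "A" text then italian_count + (PySem.Str.count text "A" : Int) else italian_count
  let italian_count : Int :=
    if PySem.Str.isIn "C" text then italian_count + (PySem.Str.count text "C" : Int) else italian_count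
  if italian_count > english_count then "italian" else "english"

-- ===== PORT B =====
-- 'ch in "KQRBN"' for a single character is membership of ch among the string's characters.
def identify_notation_system_alt (text : String) : String :=
  let p : Int × Int := text.toList.foldl
    (fun (p : Int × Int) ch =>
      if ("KQRBN".toList).contains ch then (p.1 + 1, p.2)
      else if ("DTAC".toList).contains ch then (p.1, p.2 + 1)
      else p)
    (0, 0)
  if p.2 > p.1 then "italian" else "english"

-- ===== PRECONDITION & SPEC =====
def Spec_identify_notation_system (text : String) (out : String) : Prop := out = identify_notation_system_alt text
instance (text : String) (out : String) : Decidable (Spec_identify_notation_system text out) := by unfold Spec_identify_notation_system; infer_instance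

-- ===== CLAIM (what is proved, stated in full; the proofs are below) =====
def Claim_equal_identify_notation_system : Prop := ∀ (text : String), Dom_identify_notation_system text → Spec_identify_notation_system text (identify_notation_system text)

-- ===== LEMMAS AND PROOFS =====

-- Chars.count.go on a single-character needle counts occurrences.
theorem pv_count_go_single (c : Char) (l : List Char) (fuel acc : Nat)
    (h : l.length ≤ fuel) :
    PySem.Chars.count.go [c] fuel l acc = acc + l.count c := by
  induction l generalizing fuel acc with
  | nil => cases fuel <;> simp [PySem.Chars.count.go]
  | cons hd t ih =>
    cases fuel with
    | zero => simp at h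
    | succ f =>
      have hf : t.length ≤ f := by simpa using h
      by_cases hc : c = hd
      · subst hc
        simp [PySem.Chars.count.go, List.isPrefixOf, ih _ _ hf]
        omega
      · have hb : (c == hd) = false := by simpa using hc
        have hb' : (hd == c) = false := by
          simp only [beq_eq_false_iff_ne] at hb ⊢
          exact fun h' => hc h'.symm
        simp [PySem.Chars.count.go, List.isPrefixOf, hb, hb', ih _ _ hf, List.count_cons]

theorem pv_count_single (c : Char) (l : List Char) :
    PySem.Chars.count l [c] = l.count c := by
  simp [PySem.Chars.count]
  have := pv_count_go_single c l l.length 0 le_rfl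
  omega

theorem pv_count_zero_of_not_isIn (c : Char) (l : List Char)
    (h : PySem.Chars.isIn [c] l = false) : l.count c = 0 := by
  rw [PySem.Chars.isIn_eq_false_iff] at h
  refine List.count_eq_zero.mpr (fun hm => h ?_)
  obtain ⟨s, t, rfl⟩ := List.append_of_mem hm
  exact ⟨s, t, by simp⟩

-- A's 'if piece in text: count += text.count(piece)' step adds the count unconditionally.
theorem pv_stepStr (c : Char) (p : String) (hp : p.toList = [c]) (s : String) (x : Int) :
    (if PySem.Str.isIn p s then x + (PySem.Str.count s p : Int) else x)
      = x + (s.toList.count c : Int) := by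
  rw [PySem.Str.isIn_eq, PySem.Str.count_eq, hp]
  by_cases h : PySem.Chars.isIn [c] s.toList
  · simp [h, pv_count_single]
  · simp only [Bool.not_eq_true] at h
    simp [h, pv_count_zero_of_not_isIn c s.toList h]

-- the explicit two-tally sums
def pvE (l : List Char) : Int :=
  (l.count 'K' : Int) + l.count 'Q' + l.count 'R' + l.count 'B' + l.count 'N'
def pvI (l : List Char) : Int :=
  (l.count 'D' : Int) + l.count 'T' + l.count 'A' + l.count 'C'

theorem pv_A_val (text : String) :
    identify_notation_system text
      = if pvI text.toList > pvE text.toList then "italian" else "english" := by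
  unfold identify_notation_system
  simp only [List.foldl]
  rw [pv_stepStr 'K' "K" (by decide) text, pv_stepStr 'Q' "Q" (by decide) text,
      pv_stepStr 'R' "R" (by decide) text, pv_stepStr 'B' "B" (by decide) text,
      pv_stepStr 'N' "N" (by decide) text, pv_stepStr 'D' "D" (by decide) text,
      pv_stepStr 'T' "T" (by decide) text, pv_stepStr 'A' "A" (by decide) text,
      pv_stepStr 'C' "C" (by decide) text]
  simp only [pvE, pvI]
  split_ifs with c1 c2 <;> first | rfl | (exfalso; push_cast at *; omega)

theorem pv_B_fold_lit (l : List Char) (e i : Int) :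
    l.foldl
      (fun (p : Int × Int) ch =>
        if (['K','Q','R','B','N'] : List Char).contains ch then (p.1 + 1, p.2)
        else if (['D','T','A','C'] : List Char).contains ch then (p.1, p.2 + 1)
        else p)
      (e, i) = (e + pvE l, i + pvI l) := by
  induction l generalizing e i with
  | nil => simp [pvE, pvI]
  | cons hd t ih =>
    by_cases h1 : (['K','Q','R','B','N'] : List Char).contains hd
    · have h1' : hd = 'K' ∨ hd = 'Q' ∨ hd = 'R' ∨ hd = 'B' ∨ hd = 'N' := by
        simpa using h1
      rcases h1' with rfl | rfl | rfl | rfl | rfl <;>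
        · simp only [List.foldl, h1, if_true, ih]
          simp [pvE, pvI]
          omega
    · by_cases h2 : (['D','T','A','C'] : List Char).contains hd
      · have h2' : hd = 'D' ∨ hd = 'T' ∨ hd = 'A' ∨ hd = 'C' := by
          simpa using h2
        rcases h2' with rfl | rfl | rfl | rfl <;>
          · simp only [List.foldl, h1, h2, Bool.false_eq_true, if_false, if_true, ih]
            simp [pvE, pvI]
            omega
      · have hne : hd ≠ 'K' ∧ hd ≠ 'Q' ∧ hd ≠ 'R' ∧ hd ≠ 'B' ∧ hd ≠ 'N'
            ∧ hd ≠ 'D' ∧ hd ≠ 'T' ∧ hd ≠ 'A' ∧ hd ≠ 'C' := by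
          simp at h1 h2
          tauto
        obtain ⟨k1, k2, k3, k4, k5, k6, k7, k8, k9⟩ := hne
        simp only [List.foldl, h1, h2, Bool.false_eq_true, if_false, ih]
        simp [pvE, pvI, k1, k2, k3, k4, k5, k6, k7, k8, k9]

theorem pv_B_fold (l : List Char) (e i : Int) :
    l.foldl
      (fun (p : Int × Int) ch =>
        if ("KQRBN".toList).contains ch then (p.1 + 1, p.2)
        else if ("DTAC".toList).contains ch then (p.1, p.2 + 1)
        else p)
      (e, i) = (e + pvE l, i + pvI l) := by
  have hE : "KQRBN".toList = (['K','Q','R','B','N'] : List Char) := by decide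
  have hI : "DTAC".toList = (['D','T','A','C'] : List Char) := by decide
  simp only [hE, hI]
  exact pv_B_fold_lit l e i

theorem pv_B_val (text : String) :
    identify_notation_system_alt text
      = if pvI text.toList > pvE text.toList then "italian" else "english" := by
  unfold identify_notation_system_alt
  rw [pv_B_fold]
  simp

-- ===== VERDICT (by name: the statement is the Claim_ definition above) =====
theorem identify_notation_system_spec : Claim_equal_identify_notation_system := by
  intro text _
  unfold Spec_identify_notation_system
  rw [pv_A_val, pv_B_val]
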